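-- pv_equiv track=rewrite | github.com/Vaibhav14k/DSA_Question | Leetcode-Pattern-problems-main/Leetcode-Pattern-problems-main/DP/1402_reducing_dishesh.py | solve
-- ===== SOURCE A (Python) =====
-- def solve(score, index, time):
--     n = len(score)
--     curr = [0 for _ in range(n+1)]
--     next = [0 for _ in range(n+1)]
--     for index in range(n-1,-1,-1):
--         for time in  range(n-1,-1,-1):
--             inc = score[index] * (time + 1) + next[time + 1]
--             exc = next [time]
--             curr[time] = max(inc,exc)
--         next = curr[:]
--     return curr[time]
-- ===== SOURCE B (Python) =====
-- def solve(score, index, time):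
--     # Top-down: dp(i, t) = best extra satisfaction from dishes i.. when t dishes
--     # are already chosen; memoized on demand, so only reachable (i, t) states
--     # (t <= i) are ever computed.
--     n = len(score)
--     memo = {}
--     def dp(i, t):
--         if i == n:
--             return 0
--         key = (i, t)
--         if key not in memo:
--             memo[key] = max(score[i] * (t + 1) + dp(i + 1, t + 1), dp(i + 1, t))
--         return memo[key]
--     return dp(0, 0)
-- ===== Notes on version B (the rewrite author's own statement) =====
-- stated objective: alternative
-- what changed: Replaced A's bottom-up two-array table DP (nested index/time loops) by top-down recursion on the dish index with a dict memo, computing only the reachable (i,t) states on demand.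
import Mathlib
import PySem

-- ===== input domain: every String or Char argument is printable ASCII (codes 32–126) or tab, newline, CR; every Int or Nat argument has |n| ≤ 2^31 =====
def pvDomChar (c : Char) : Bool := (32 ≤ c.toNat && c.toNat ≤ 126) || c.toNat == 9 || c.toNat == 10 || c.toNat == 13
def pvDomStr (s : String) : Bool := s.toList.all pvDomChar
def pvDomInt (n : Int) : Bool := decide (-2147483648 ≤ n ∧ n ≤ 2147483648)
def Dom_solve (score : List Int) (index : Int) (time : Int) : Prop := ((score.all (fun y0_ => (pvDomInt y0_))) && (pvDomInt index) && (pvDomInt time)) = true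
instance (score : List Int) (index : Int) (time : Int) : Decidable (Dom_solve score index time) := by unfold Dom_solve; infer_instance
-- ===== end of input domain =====

-- B replaces A's bottom-up two-array table DP by top-down memoized recursion on the
-- dish index (objective: alternative decomposition, same recurrence; return value only).

-- ===== PORT A =====
-- one outer-loop body of A: the inner `for time in range(n-1,-1,-1)` writing curr[time],
-- then `next = curr[:]`; the Python loop variable `time` persists, so it rides in the state
def stepA (score : List Int) (n : Int) (st : List Int × List Int × Int) (idx : Int) :
    List Int × List Int × Int :=
  let q :=
    (PySem.List.pyRange (n - 1) (-1) (-1)).foldl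
      (fun (q : List Int × Int) time =>
        let inc := PySem.List.pyGetD score idx 0 * (time + 1) + PySem.List.pyGetD st.2.1 (time + 1) 0
        let exc := PySem.List.pyGetD st.2.1 time 0
        (PySem.List.pySetD q.1 time (max inc exc), time))
      (st.1, st.2.2)
  (q.1, q.1, q.2)

def solve (score : List Int) (index : Int) (time : Int) : Int :=
  let n : Int := (score.length : Int)
  let curr : List Int := (PySem.List.pyRange 0 (n + 1) 1).map (fun _ => 0)
  let next : List Int := (PySem.List.pyRange 0 (n + 1) 1).map (fun _ => 0)
  let st := (PySem.List.pyRange (n - 1) (-1) (-1)).foldl (stepA score n) (curr, next, time)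
  PySem.List.pyGetD st.1 st.2.2 0

-- ===== PORT B =====
-- B's recursion dp(i, t) over the suffix score[i:]; the dict memo of Source B is pure
-- caching of this same recurrence, so the port is the recurrence itself,
-- recursing on the suffix of the list instead of the index i.
def dpAlt : List Int → Int → Int
  | [], _ => 0
  | x :: s, t => max (x * (t + 1) + dpAlt s (t + 1)) (dpAlt s t)

def solve_alt (score : List Int) (index : Int) (time : Int) : Int :=
  dpAlt score 0

-- ===== PRECONDITION & SPEC =====
-- Pre_ excludes exactly the inputs on which A raises IndexError: an empty score
-- with a final `time` other than 0 or -1 (A then evaluates [0][time]).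
def Pre_solve (score : List Int) (index : Int) (time : Int) : Prop :=
  score ≠ [] ∨ time = 0 ∨ time = -1
instance (score : List Int) (index : Int) (time : Int) : Decidable (Pre_solve score index time) := by
  unfold Pre_solve; infer_instance

def pvWitness_solve : List Int × Int × Int := ([3, -1, 2], 0, 0)

def Spec_solve (score : List Int) (index : Int) (time : Int) (out : Int) : Prop :=
  out = solve_alt score index time
instance (score : List Int) (index : Int) (time : Int) (out : Int) : Decidable (Spec_solve score index time out) := by
  unfold Spec_solve; infer_instance

-- ===== CLAIM (what is proved, stated in full; the proofs are below) =====
def Claim_equal_solve : Prop := ∀ (score : List Int) (index : Int) (time : Int), Dom_solve score index time → Pre_solve score index time → Spec_solve score index time (solve score index time)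


-- ===== LEMMAS AND PROOFS =====

theorem pairfold (ts : List Int) (f : List Int → Int → List Int) : ∀ (c : List Int) (tv : Int),
    ts.foldl (fun q t => (f q.1 t, t)) (c, tv) = (ts.foldl f c, ts.foldl (fun _ t => t) tv) := by
  induction ts with
  | nil => intros; rfl
  | cons t ts ih => intro c tv; simp only [List.foldl_cons]; exact ih (f c t) t

theorem setfold_len (ts : List Int) : ∀ (c : List Int) (g : Int → Int),
    (ts.foldl (fun c t => PySem.List.pySetD c t (g t)) c).length = c.length := by
  induction ts with
  | nil => intros; rfl
  | cons t ts ih =>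
    intro c g
    simp only [List.foldl_cons]
    rw [ih]
    exact PySem.List.length_pySetD ..

theorem setfold (ts : List Int) : ∀ (c : List Int) (g : Int → Int),
    (∀ t ∈ ts, 0 ≤ t ∧ t < (c.length : Int)) → ∀ j : Nat, j < c.length →
    (ts.foldl (fun c t => PySem.List.pySetD c t (g t)) c).getD j 0 =
      if (j : Int) ∈ ts then g (j : Int) else c.getD j 0 := by
  induction ts with
  | nil => intro c g h j hj; simp
  | cons t ts ih =>
    intro c g h j hj
    obtain ⟨ht0, htl⟩ := h t List.mem_cons_self
    simp only [List.foldl_cons]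
    have hlen : (PySem.List.pySetD c t (g t)).length = c.length := PySem.List.length_pySetD ..
    rw [ih (PySem.List.pySetD c t (g t)) g
      (by intro u hu; rw [hlen]; exact h u (List.mem_cons_of_mem _ hu)) j (by rw [hlen]; exact hj)]
    by_cases hmem : (j : Int) ∈ ts
    · rw [if_pos hmem, if_pos (List.mem_cons_of_mem _ hmem)]
    · rw [if_neg hmem]
      rw [PySem.List.pySetD_of_nonneg c (g t) ht0]
      by_cases hjt : (j : Int) = t
      · have hjn : t.toNat = j := by omega
        rw [hjn, List.getD_eq_getElem?_getD, List.getElem?_set, if_pos rfl, if_pos hj]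
        rw [if_pos (by rw [hjt]; exact List.mem_cons_self)]
        rw [hjt]
        rfl
      · have hne : t.toNat ≠ j := by omega
        rw [List.getD_eq_getElem?_getD, List.getElem?_set, if_neg hne,
          ← List.getD_eq_getElem?_getD]
        rw [if_neg (by simp [List.mem_cons, hjt, hmem])]

theorem stepA_eq (score curr next : List Int) (tv : Int) :
    stepA score (score.length : Int) (curr, next, tv) =
      fun idx' =>
      ((PySem.List.pyRange ((score.length : Int) - 1) (-1) (-1)).foldl
          (fun c t => PySem.List.pySetD c t
            (max (PySem.List.pyGetD score idx' 0 * (t + 1) + PySem.List.pyGetD next (t + 1) 0)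
                 (PySem.List.pyGetD next t 0))) curr,
       (PySem.List.pyRange ((score.length : Int) - 1) (-1) (-1)).foldl
          (fun c t => PySem.List.pySetD c t
            (max (PySem.List.pyGetD score idx' 0 * (t + 1) + PySem.List.pyGetD next (t + 1) 0)
                 (PySem.List.pyGetD next t 0))) curr,
       (PySem.List.pyRange ((score.length : Int) - 1) (-1) (-1)).foldl (fun _ t => t) tv) := by
  funext idx'
  simp only [stepA]
  rw [pairfold (PySem.List.pyRange ((score.length : Int) - 1) (-1) (-1))
    (fun c t => PySem.List.pySetD c t
      (max (PySem.List.pyGetD score idx' 0 * (t + 1) + PySem.List.pyGetD next (t + 1) 0)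
           (PySem.List.pyGetD next t 0))) curr tv]

theorem lastfold (l : List Int) (z tv : Int) : (l ++ [z]).foldl (fun _ t => t) tv = z := by
  rw [List.foldl_append]
  rfl

theorem range_split (n : Nat) (h : 1 ≤ n) :
    PySem.List.pyRange ((n : Int) - 1) (-1) (-1) =
      (PySem.List.pyRange 1 (n : Int)).reverse ++ [0] := by
  rw [PySem.List.pyRange_neg_one_eq_reverse, show (-1 : Int) + 1 = 0 by norm_num,
    show (n : Int) - 1 + 1 = (n : Int) by ring,
    PySem.List.pyRange_one_cons (by omega : (0 : Int) < (n : Int)), List.reverse_cons]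
  norm_num

theorem mem_countdown (n j : Nat) :
    ((j : Int) ∈ PySem.List.pyRange ((n : Int) - 1) (-1) (-1)) ↔ j < n := by
  rw [PySem.List.mem_pyRange_neg_one]
  omega

theorem outerA (score : List Int) (j : Nat) : ∀ (curr next : List Int) (tv : Int),
    j < score.length →
    curr.length = score.length + 1 → next.length = score.length + 1 →
    curr.getD score.length 0 = 0 →
    (∀ t : Nat, t ≤ j + 1 → next.getD t 0 = dpAlt (score.drop (j + 1)) (t : Int)) →
    ((PySem.List.pyRange (j : Int) (-1) (-1)).foldl (stepA score (score.length : Int))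
        (curr, next, tv)).1.getD 0 0 = dpAlt score 0 ∧
    ((PySem.List.pyRange (j : Int) (-1) (-1)).foldl (stepA score (score.length : Int))
        (curr, next, tv)).2.2 = 0 := by
  induction j with
  | zero =>
    intro curr next tv hj hcl hnl hcn hinv
    have h0 : PySem.List.pyRange ((0 : Nat) : Int) (-1) (-1) = [(0 : Int)] := by
      rw [Nat.cast_zero, PySem.List.pyRange_neg_one_cons (by norm_num),
        PySem.List.pyRange_neg_one_eq_nil (by norm_num)]
    rw [h0]
    simp only [List.foldl_cons, List.foldl_nil]
    rw [stepA_eq score curr next tv]; simp only []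
    have hbounds : ∀ t ∈ PySem.List.pyRange ((score.length : Int) - 1) (-1) (-1),
        0 ≤ t ∧ t < (curr.length : Int) := by
      intro t ht
      rw [PySem.List.mem_pyRange_neg_one] at ht
      rw [hcl]; push_cast; omega
    constructor
    · rw [setfold _ curr _ hbounds 0 (by omega)]
      rw [if_pos ((mem_countdown score.length 0).2 hj)]
      rw [Nat.cast_zero, show (0 : Int) + 1 = ((1 : Nat) : Int) by norm_num,
        PySem.List.pyGetD_natCast, PySem.List.pyGetD_zero, PySem.List.pyGetD_zero,
        hinv 1 (by omega), hinv 0 (by omega)]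
      have hget0 : score.getD 0 0 = score[0]'hj := by
        rw [List.getD_eq_getElem?_getD, List.getElem?_eq_getElem hj]; rfl
      rw [hget0]
      have hsc : score[0]'hj :: score.drop (0 + 1) = score := by
        rw [List.getElem_cons_drop hj]; exact List.drop_zero
      conv_rhs => rw [← hsc]
      simp only [dpAlt]
      push_cast
      norm_num
    · rw [range_split score.length (by omega), lastfold]
  | succ j ih =>
    intro curr next tv hj hcl hnl hcn hinv
    rw [show PySem.List.pyRange (((j + 1 : Nat)) : Int) (-1) (-1)
        = (((j + 1 : Nat)) : Int) :: PySem.List.pyRange ((j : Nat) : Int) (-1) (-1) by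
      rw [PySem.List.pyRange_neg_one_cons (by push_cast; omega)]
      congr 1
      push_cast
      ring]
    simp only [List.foldl_cons]
    rw [stepA_eq score curr next tv]; simp only []
    have hbounds : ∀ t ∈ PySem.List.pyRange ((score.length : Int) - 1) (-1) (-1),
        0 ≤ t ∧ t < (curr.length : Int) := by
      intro t ht
      rw [PySem.List.mem_pyRange_neg_one] at ht
      rw [hcl]; push_cast; omega
    have hFlen : ((PySem.List.pyRange ((score.length : Int) - 1) (-1) (-1)).foldl
        (fun c t => PySem.List.pySetD c t
          (max (PySem.List.pyGetD score (((j + 1 : Nat)) : Int) 0 * (t + 1) + PySem.List.pyGetD next (t + 1) 0)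
               (PySem.List.pyGetD next t 0))) curr).length = curr.length := setfold_len ..
    apply ih
    · omega
    · rw [hFlen, hcl]
    · rw [hFlen, hcl]
    · rw [setfold _ curr _ hbounds score.length (by omega)]
      rw [if_neg (by rw [mem_countdown]; omega), hcn]
    · intro t ht
      rw [setfold _ curr _ hbounds t (by omega)]
      rw [if_pos ((mem_countdown score.length t).2 (by omega))]
      rw [show ((t : Nat) : Int) + 1 = ((t + 1 : Nat) : Int) by push_cast; ring,
        PySem.List.pyGetD_natCast, PySem.List.pyGetD_natCast, PySem.List.pyGetD_natCast,
        hinv (t + 1) (by omega), hinv t (by omega)]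
      have hget1 : score.getD (j + 1) 0 = score[j + 1]'hj := by
        rw [List.getD_eq_getElem?_getD, List.getElem?_eq_getElem hj]; rfl
      rw [hget1]
      conv_rhs => rw [← List.getElem_cons_drop hj]
      simp only [dpAlt]
      push_cast
      norm_num

theorem solve_nil (index time : Int) (h : time = 0 ∨ time = -1) : solve [] index time = 0 := by
  simp only [solve, List.length_nil, Nat.cast_zero]
  rw [PySem.List.pyRange_neg_one_eq_nil (by norm_num),
    show (0 : Int) + 1 = 0 + 1 from rfl, PySem.List.pyRange_one_singleton]
  simp only [List.foldl_nil, List.map_cons, List.map_nil]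
  rcases h with h | h <;> subst h
  · exact PySem.List.pyGetD_zero_cons ..
  · rw [PySem.List.pyGetD_neg_one _ _ (by simp)]
    rfl

theorem solve_eq_dpAlt (score : List Int) (index time : Int) (h : score ≠ []) :
    solve score index time = dpAlt score 0 := by
  have hn : 1 ≤ score.length := List.length_pos_of_ne_nil h
  simp only [solve]
  have hrep : (PySem.List.pyRange 0 ((score.length : Int) + 1)).map (fun _ => (0 : Int))
      = List.replicate (score.length + 1) 0 := by
    rw [List.map_const', PySem.List.length_pyRange_one,
      show (((score.length : Int) + 1 - 0)).toNat = score.length + 1 by omega]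
  rw [hrep, show (score.length : Int) - 1 = ((score.length - 1 : Nat) : Int) by omega]
  have ho := outerA score (score.length - 1) (List.replicate (score.length + 1) 0)
    (List.replicate (score.length + 1) 0) time (by omega)
    (by simp) (by simp)
    (List.getD_replicate _ (by omega))
    (by
      intro t ht
      rw [show score.length - 1 + 1 = score.length by omega, List.drop_length,
        List.getD_replicate _ (by omega)]
      rfl)
  rw [ho.2, PySem.List.pyGetD_zero]
  exact ho.1

-- ===== VERDICT (by name: the statement is the Claim_ definition above) =====
theorem solve_spec : Claim_equal_solve := by
  intro score index time hdom hpre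
  unfold Spec_solve
  show solve score index time = dpAlt score 0
  rcases score with _ | ⟨a, s⟩
  · rcases hpre with h | h | h
    · exact absurd rfl h
    · rw [solve_nil _ _ (Or.inl h)]; rfl
    · rw [solve_nil _ _ (Or.inr h)]; rfl
  · exact solve_eq_dpAlt _ _ _ (by simp)
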